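-- pv_equiv track=rewrite | github.com/JakeEhrlich/CXEMA | scripts/generate_test_vectors.py | sim_cx74
-- ===== SOURCE A (Python) =====
-- def sim_cx74(inputs: dict, n_ticks: int) -> dict:
--     """CX74: D flip-flop (positive edge triggered)
--     On rising edge of CLK, Q takes value of D
--     """
--     q = [0] * n_ticks
--     state = 0
--     prev_clk = 0
--     for t in range(n_ticks):
--         clk = inputs['CLK'][t]
--         d = inputs['D'][t]
--         # Rising edge detection
--         if clk and not prev_clk:
--             state = d
--         q[t] = state
--         prev_clk = clk
--     return {
--         'Q': q,
--         '~Q': [1 - q[t] for t in range(n_ticks)],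
--     }
-- ===== SOURCE B (Python) =====
-- def sim_cx74(inputs: dict, n_ticks: int) -> dict:
--     """CX74: D flip-flop (positive edge triggered) — events-then-segment-fill."""
--     edges = [(t, inputs['D'][t]) for t in range(n_ticks)
--              if inputs['CLK'][t] and not (inputs['CLK'][t - 1] if t else 0)]
--     nexts = [t for t, _ in edges][1:] + [n_ticks]
--     q = [0] * (edges[0][0] if edges else n_ticks)
--     for (t, v), nxt in zip(edges, nexts):
--         q += [v] * (nxt - t)
--     return {
--         'Q': q,
--         '~Q': [1 - v for v in q],
--     }
-- ===== Notes on version B (the rewrite author's own statement) =====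
-- stated objective: alternative
-- what changed: Replaces the single stateful carry loop (state/prev_clk threaded through every tick) with an events-then-segment-fill decomposition: first collect rising-edge events (t, D[t]), then build Q by concatenating constant segments between consecutive edges.
import Mathlib
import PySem

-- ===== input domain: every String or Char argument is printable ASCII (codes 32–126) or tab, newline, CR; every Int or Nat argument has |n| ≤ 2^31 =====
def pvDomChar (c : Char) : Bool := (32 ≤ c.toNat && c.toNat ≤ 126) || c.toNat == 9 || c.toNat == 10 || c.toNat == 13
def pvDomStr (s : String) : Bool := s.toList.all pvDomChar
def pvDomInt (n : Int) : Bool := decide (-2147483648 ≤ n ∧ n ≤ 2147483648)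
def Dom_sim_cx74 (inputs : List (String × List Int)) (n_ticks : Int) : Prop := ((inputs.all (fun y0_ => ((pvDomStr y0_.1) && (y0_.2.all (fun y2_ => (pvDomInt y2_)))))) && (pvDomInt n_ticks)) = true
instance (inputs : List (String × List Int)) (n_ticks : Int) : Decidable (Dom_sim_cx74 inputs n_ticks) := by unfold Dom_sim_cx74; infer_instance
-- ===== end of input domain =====

-- B replaces A's stateful carry loop by an events-then-segment-fill decomposition (same cost); return-value equivalence only.

-- ===== PORT A =====
-- A: q = [0]*n_ticks; one stateful loop carrying (q, state, prev_clk); dict access inputs['CLK']/'D' (first match),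
-- out-of-range / missing-key accesses are excluded by Pre_ (Python raises there), so getD defaults are never used.
def sim_cx74 (inputs : List (String × List Int)) (n_ticks : Int) : List (String × List Int) :=
  let q0 : List Int := List.replicate n_ticks.toNat 0
  let res :=
    (PySem.List.pyRange 0 n_ticks 1).foldl
      (fun (st : List Int × Int × Int) t =>
        let q := st.1
        let state := st.2.1
        let prev_clk := st.2.2
        let clk := PySem.List.pyGetD ((inputs.lookup "CLK").getD []) t 0
        let d := PySem.List.pyGetD ((inputs.lookup "D").getD []) t 0
        let state := if clk ≠ 0 ∧ prev_clk = 0 then d else state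
        let q := PySem.List.pySetD q t state
        (q, state, clk))
      (q0, 0, 0)
  let q := res.1
  [("Q", q), ("~Q", (PySem.List.pyRange 0 n_ticks 1).map (fun t => 1 - PySem.List.pyGetD q t 0))]

-- ===== PORT B =====
-- B: collect rising edges (t, D[t]); fill Q as [0]*gap then one constant segment per edge up to the next edge.
def sim_cx74_alt (inputs : List (String × List Int)) (n_ticks : Int) : List (String × List Int) :=
  let clkL : List Int := (inputs.lookup "CLK").getD []
  let dL : List Int := (inputs.lookup "D").getD []
  let edges : List (Int × Int) :=
    ((PySem.List.pyRange 0 n_ticks 1).filter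
        (fun t => PySem.List.pyGetD clkL t 0 ≠ 0 ∧
          (t = 0 ∨ PySem.List.pyGetD clkL (t - 1) 0 = 0))).map
      (fun t => (t, PySem.List.pyGetD dL t 0))
  let nexts : List Int := (edges.map Prod.fst).tail ++ [n_ticks]
  let q0 : List Int :=
    List.replicate (match edges with | [] => n_ticks.toNat | (t, _) :: _ => t.toNat) 0
  let q := (edges.zip nexts).foldl
    (fun (q : List Int) (p : (Int × Int) × Int) =>
      q ++ List.replicate (p.2 - p.1.1).toNat p.1.2) q0
  [("Q", q), ("~Q", q.map (fun v => 1 - v))]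

-- ===== PRECONDITION & SPEC =====
-- Pre_ excludes exactly the inputs where Python A raises: for n_ticks > 0 it needs keys 'CLK' and 'D'
-- (else KeyError) with lists of length ≥ n_ticks (else IndexError); for n_ticks ≤ 0 A returns without any access.
def Pre_sim_cx74 (inputs : List (String × List Int)) (n_ticks : Int) : Prop :=
  n_ticks ≤ 0 ∨
    ((inputs.lookup "CLK").isSome ∧ (inputs.lookup "D").isSome ∧
      n_ticks ≤ ((inputs.lookup "CLK").getD []).length ∧
      n_ticks ≤ ((inputs.lookup "D").getD []).length)
instance (inputs : List (String × List Int)) (n_ticks : Int) : Decidable (Pre_sim_cx74 inputs n_ticks) := by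
  unfold Pre_sim_cx74; infer_instance
def pvWitness_sim_cx74 : (List (String × List Int)) × Int := ([("CLK", [0, 1, 0]), ("D", [5, 7, 2])], 3)

def Spec_sim_cx74 (inputs : List (String × List Int)) (n_ticks : Int) (out : List (String × List Int)) : Prop := out = sim_cx74_alt inputs n_ticks
instance (inputs : List (String × List Int)) (n_ticks : Int) (out : List (String × List Int)) : Decidable (Spec_sim_cx74 inputs n_ticks out) := by unfold Spec_sim_cx74; infer_instance

-- ===== CLAIM (what is proved, stated in full; the proofs are below) =====
def Claim_equal_sim_cx74 : Prop := ∀ (inputs : List (String × List Int)) (n_ticks : Int), Dom_sim_cx74 inputs n_ticks → Pre_sim_cx74 inputs n_ticks → Spec_sim_cx74 inputs n_ticks (sim_cx74 inputs n_ticks)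

-- ===== LEMMAS AND PROOFS =====

-- rising-edge test at tick t (c = total CLK accessor)
def pvRiseB (c : Int → Int) (t : Int) : Bool := decide (c t ≠ 0 ∧ (t = 0 ∨ c (t - 1) = 0))

-- reference run: Q values for ticks a, a+1, …, a+k-1 starting from state s
def pvRun (c d : Int → Int) (s : Int) (a : Int) : ℕ → List Int
  | 0 => []
  | k + 1 =>
      let s' := if pvRiseB c a then d a else s
      s' :: pvRun c d s' (a + 1) k

-- B's segment filler on the list of edge ticks
def pvFill (d : Int → Int) (hi : Int) : List Int → List Int
  | [] => []
  | t :: rest => List.replicate ((rest.headD hi - t).toNat) (d t) ++ pvFill d hi rest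

-- A's loop body, abstracted over the CLK/D accessors
def pvBodyA (c d : Int → Int) (st : List Int × Int × Int) (t : Int) : List Int × Int × Int :=
  let clk := c t
  let dd := d t
  let state := if clk ≠ 0 ∧ st.2.2 = 0 then dd else st.2.1
  (PySem.List.pySetD st.1 t state, state, clk)

lemma pv_set_append_len (pre rest : List Int) (x v : Int) :
    (pre ++ x :: rest).set pre.length v = pre ++ v :: rest := by
  induction pre with
  | nil => simp
  | cons h t ih => simp [ih]

lemma pvRun_length (c d : Int → Int) : ∀ (k : ℕ) (a s : Int), (pvRun c d s a k).length = k := by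
  intro k
  induction k with
  | zero => intro a s; simp [pvRun]
  | succ k ih => intro a s; simp [pvRun, ih]

lemma pv_foldA_eq (c d : Int → Int) :
    ∀ (k a : ℕ) (s p : Int) (pre : List Int), pre.length = a →
      p = (if (a : Int) = 0 then 0 else c ((a : Int) - 1)) →
      ((PySem.List.pyRange a ((a : Int) + k) 1).foldl (pvBodyA c d)
          (pre ++ List.replicate k 0, s, p)).1 = pre ++ pvRun c d s a k := by
  intro k
  induction k with
  | zero =>
      intro a s p pre hl hp
      rw [PySem.List.pyRange_one_eq_nil (by omega)]
      simp [pvRun]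
  | succ k ih =>
      intro a s p pre hl hp
      rw [PySem.List.pyRange_one_cons (by omega : (a : Int) < (a : Int) + (k + 1 : ℕ))]
      rw [List.foldl_cons]
      have hcond : ((c a ≠ 0 ∧ p = 0) ↔ pvRiseB c a = true) := by
        rcases Nat.eq_zero_or_pos a with h0 | hpos
        · subst h0; simp [pvRiseB, hp]
        · have hne : ((a : Int)) ≠ 0 := by omega
          simp only [pvRiseB, hp, hne, if_false, decide_eq_true_eq]
          tauto
      have hbody : pvBodyA c d (pre ++ List.replicate (k + 1) 0, s, p) a =
          (pre ++ (if pvRiseB c a then d a else s) :: List.replicate k 0,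
            (if pvRiseB c a then d a else s), c a) := by
        simp only [pvBodyA, List.replicate_succ]
        rw [if_congr hcond rfl rfl]
        rw [PySem.List.pySetD_natCast, ← hl, pv_set_append_len]
      rw [hbody, List.append_cons]
      have harr : (a : Int) + ((k + 1 : ℕ) : Int) = ((a + 1 : ℕ) : Int) + (k : ℕ) := by
        push_cast; ring
      have hrange : PySem.List.pyRange ((a : Int) + 1) ((a : Int) + ((k + 1 : ℕ) : Int)) 1 =
          PySem.List.pyRange ((a + 1 : ℕ) : Int) (((a + 1 : ℕ) : Int) + (k : ℕ)) 1 := by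
        rw [harr]; norm_num
      rw [hrange]
      rw [ih (a + 1) (if pvRiseB c a then d a else s) (c a) (pre ++ [if pvRiseB c a then d a else s])
            (by simp [hl]) (by rw [if_neg (by push_cast; omega : ¬((a+1:ℕ):Int) = 0)]; push_cast; ring_nf)]
      simp [pvRun]

lemma pv_map_one_sub (q : List Int) :
    (PySem.List.pyRange 0 ((q.length : ℕ) : Int) 1).map (fun t => 1 - PySem.List.pyGetD q t 0) =
      q.map (fun v => 1 - v) := by
  apply List.ext_getElem
  · simp [PySem.List.length_pyRange_one]
  · intro i h1 h2
    have hi : i < q.length := by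
      simpa [PySem.List.length_pyRange_one] using h1
    simp [PySem.List.getElem_pyRange_one, List.getElem?_eq_getElem hi]

lemma pv_map_one_sub' (q : List Int) (n : Int) (h : n = ((q.length : ℕ) : Int)) :
    (PySem.List.pyRange 0 n 1).map (fun t => 1 - PySem.List.pyGetD q t 0) =
      q.map (fun v => 1 - v) := by
  subst h; exact pv_map_one_sub q

lemma pv_fill_fold (d : Int → Int) :
    ∀ (ts : List Int) (hi : Int) (acc : List Int),
      ((ts.map (fun t => (t, d t))).zip
            (((ts.map (fun t => (t, d t))).map Prod.fst).tail ++ [hi])).foldl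
          (fun (q : List Int) (p : (Int × Int) × Int) =>
            q ++ List.replicate (p.2 - p.1.1).toNat p.1.2) acc
        = acc ++ pvFill d hi ts := by
  intro ts
  induction ts with
  | nil => intro hi acc; simp [pvFill]
  | cons t rest ih =>
      intro hi acc
      cases rest with
      | nil => simp [pvFill]
      | cons t2 r2 =>
          have := ih hi (acc ++ List.replicate (t2 - t).toNat (d t))
          simp only [List.map_cons, List.map_map, List.tail_cons] at this ⊢
          simp only [List.cons_append, List.zip_cons_cons, List.foldl_cons]
          simp only [pvFill, List.headD]
          rw [← List.append_assoc]
          simpa using this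


def pvC (inputs : List (String × List Int)) : Int → Int :=
  fun t => PySem.List.pyGetD ((inputs.lookup "CLK").getD []) t 0
def pvD (inputs : List (String × List Int)) : Int → Int :=
  fun t => PySem.List.pyGetD ((inputs.lookup "D").getD []) t 0

lemma pv_run_eq_fill (c d : Int → Int) :
    ∀ (k : ℕ) (a s : Int),
      pvRun c d s a k =
        List.replicate
            ((((PySem.List.pyRange a (a + (k : ℕ)) 1).filter (pvRiseB c)).headD (a + (k : ℕ)) - a).toNat) s
          ++ pvFill d (a + (k : ℕ)) ((PySem.List.pyRange a (a + (k : ℕ)) 1).filter (pvRiseB c)) := by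
  intro k
  induction k with
  | zero =>
      intro a s
      rw [PySem.List.pyRange_one_eq_nil (by push_cast; omega)]
      simp [pvRun, pvFill]
  | succ k ih =>
      intro a s
      have hlt : a < a + ((k + 1 : ℕ) : Int) := by push_cast; omega
      rw [PySem.List.pyRange_one_cons hlt, List.filter_cons]
      have harr : a + ((k + 1 : ℕ) : Int) = (a + 1) + (k : ℕ) := by push_cast; ring
      have hmem : ∀ t ∈ (PySem.List.pyRange (a + 1) (a + ((k + 1 : ℕ) : Int)) 1).filter (pvRiseB c),
          a + 1 ≤ t := by
        intro t ht
        exact ((PySem.List.mem_pyRange_one.mp (List.mem_filter.mp ht).1)).1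
      have hhead : a + 1 ≤
          ((PySem.List.pyRange (a + 1) (a + ((k + 1 : ℕ) : Int)) 1).filter (pvRiseB c)).headD
            (a + ((k + 1 : ℕ) : Int)) := by
        cases h : (PySem.List.pyRange (a + 1) (a + ((k + 1 : ℕ) : Int)) 1).filter (pvRiseB c) with
        | nil => simp only [List.headD_nil]; push_cast; omega
        | cons t ts =>
            have := hmem t (by rw [h]; exact List.mem_cons_self ..)
            simpa using this
      have ihe := ih (a + 1) (if pvRiseB c a then d a else s)
      rw [← harr] at ihe
      simp only [pvRun]
      by_cases hr : pvRiseB c a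
      · simp only [hr, if_true]
        rw [if_pos hr] at ihe
        rw [ihe]
        simp only [List.headD_cons, pvFill]
        have hm : (((PySem.List.pyRange (a + 1) (a + ((k + 1 : ℕ) : Int)) 1).filter
              (pvRiseB c)).headD (a + ((k + 1 : ℕ) : Int)) - a).toNat =
            (((PySem.List.pyRange (a + 1) (a + ((k + 1 : ℕ) : Int)) 1).filter
              (pvRiseB c)).headD (a + ((k + 1 : ℕ) : Int)) - (a + 1)).toNat + 1 := by omega
        rw [hm, List.replicate_succ]
        simp
      · simp only [hr, if_false, Bool.false_eq_true]
        rw [if_neg hr] at ihe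
        rw [ihe]
        have hm : (((PySem.List.pyRange (a + 1) (a + ((k + 1 : ℕ) : Int)) 1).filter
              (pvRiseB c)).headD (a + ((k + 1 : ℕ) : Int)) - a).toNat =
            (((PySem.List.pyRange (a + 1) (a + ((k + 1 : ℕ) : Int)) 1).filter
              (pvRiseB c)).headD (a + ((k + 1 : ℕ) : Int)) - (a + 1)).toNat + 1 := by omega
        rw [hm, List.replicate_succ]
        simp

lemma pv_A_eq_run (inputs : List (String × List Int)) (n : Int) (hn : 0 < n) :
    sim_cx74 inputs n =
      [("Q", pvRun (pvC inputs) (pvD inputs) 0 0 n.toNat),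
       ("~Q", (pvRun (pvC inputs) (pvD inputs) 0 0 n.toNat).map (fun v => 1 - v))] := by
  have hcast : ((n.toNat : ℕ) : Int) = n := by omega
  have h1 := pv_foldA_eq (pvC inputs) (pvD inputs) n.toNat 0 0 0 [] rfl (by simp)
  simp only [Nat.cast_zero, zero_add, List.nil_append, hcast] at h1
  show
    [("Q", ((PySem.List.pyRange 0 n 1).foldl (pvBodyA (pvC inputs) (pvD inputs))
        (List.replicate n.toNat 0, 0, 0)).1),
     ("~Q", (PySem.List.pyRange 0 n 1).map (fun t => 1 -
        PySem.List.pyGetD (((PySem.List.pyRange 0 n 1).foldl (pvBodyA (pvC inputs) (pvD inputs))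
          (List.replicate n.toNat 0, 0, 0)).1) t 0))] = _
  rw [h1]
  rw [pv_map_one_sub' (pvRun (pvC inputs) (pvD inputs) 0 0 n.toNat) n (by rw [pvRun_length]; omega)]

lemma pv_B_eq_fill (inputs : List (String × List Int)) (n : Int) :
    sim_cx74_alt inputs n =
      (let ts := (PySem.List.pyRange 0 n 1).filter (pvRiseB (pvC inputs));
       let q := List.replicate ((ts.headD n).toNat) 0 ++ pvFill (pvD inputs) n ts;
       [("Q", q), ("~Q", q.map (fun v => 1 - v))]) := by
  show
    (let ts := (PySem.List.pyRange 0 n 1).filter (pvRiseB (pvC inputs));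
     let edges := ts.map (fun t => (t, pvD inputs t));
     let q := (edges.zip ((edges.map Prod.fst).tail ++ [n])).foldl
        (fun (q : List Int) (p : (Int × Int) × Int) =>
          q ++ List.replicate (p.2 - p.1.1).toNat p.1.2)
        (List.replicate (match edges with | [] => n.toNat | (t, _) :: _ => t.toNat) 0);
     [("Q", q), ("~Q", q.map (fun v => 1 - v))]) = _
  simp only
  rw [pv_fill_fold]
  cases (PySem.List.pyRange 0 n 1).filter (pvRiseB (pvC inputs)) with
  | nil => simp [pvFill]
  | cons t ts => simp

-- ===== VERDICT =====
theorem sim_cx74_spec : Claim_equal_sim_cx74 := by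
  intro inputs n_ticks _hdom _hpre
  unfold Spec_sim_cx74
  by_cases hn : n_ticks ≤ 0
  · simp only [sim_cx74, sim_cx74_alt, PySem.List.pyRange_one_eq_nil hn]
    simp [Int.toNat_of_nonpos hn]
  · have hn' : 0 < n_ticks := by omega
    rw [pv_A_eq_run inputs n_ticks hn', pv_B_eq_fill inputs n_ticks]
    simp only
    have h := pv_run_eq_fill (pvC inputs) (pvD inputs) n_ticks.toNat 0 0
    have hcast : ((n_ticks.toNat : ℕ) : Int) = n_ticks := by omega
    simp only [zero_add, hcast, Int.sub_zero] at h
    rw [h]
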